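-- pv_equiv track=rewrite | github.com/infomuscle/Algorithms_BOJ | CM1.py | solution
-- ===== SOURCE A (Python) =====
-- def solution(people, tshirts):
--     answer = 0
--     for i in range(1, 1001):
--         p = people.count(i)
--         t = tshirts.count(i)
--         if p == 0 or t == 0:
--             pass
--         elif p >= t:
--             answer += t
--         elif p < t:
--             answer += p
--
--     return answer
-- ===== SOURCE B (Python) =====
-- def solution(people, tshirts):
--     cnt = {}
--     for t in tshirts:
--         cnt[t] = cnt.get(t, 0) + 1
--     answer = 0
--     for v in people:
--         if 1 <= v <= 1000 and cnt.get(v, 0) > 0: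
--             cnt[v] = cnt[v] - 1
--             answer += 1
--     return answer
-- ===== Notes on version B (the rewrite author's own statement) =====
-- stated objective: faster
-- what changed: Instead of scanning the whole 1..1000 value domain and re-counting both lists with list.count (quadratic), B builds a tshirt counter dict once and makes one greedy pass over people, consuming a live multiset.
import Mathlib
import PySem

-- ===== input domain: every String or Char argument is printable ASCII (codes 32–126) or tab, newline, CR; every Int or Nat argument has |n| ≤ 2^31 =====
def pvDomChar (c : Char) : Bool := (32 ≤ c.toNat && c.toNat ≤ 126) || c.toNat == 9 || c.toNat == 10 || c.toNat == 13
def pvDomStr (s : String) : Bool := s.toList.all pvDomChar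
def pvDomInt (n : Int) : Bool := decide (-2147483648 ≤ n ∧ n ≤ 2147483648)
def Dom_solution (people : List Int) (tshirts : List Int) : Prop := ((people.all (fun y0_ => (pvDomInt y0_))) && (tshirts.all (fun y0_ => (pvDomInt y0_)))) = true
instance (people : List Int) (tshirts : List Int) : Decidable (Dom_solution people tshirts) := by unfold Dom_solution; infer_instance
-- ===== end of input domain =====

-- B replaces A's scan of the whole value domain 1..1000 (re-counting both lists each time)
-- by one counter dict over tshirts and one greedy consuming pass over people (faster).

-- ===== PORT A =====
def solution (people : List Int) (tshirts : List Int) : Int :=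
  (PySem.List.pyRange 1 1001 1).foldl (fun answer i =>
    let p : Int := (people.count i : Int)
    let t : Int := (tshirts.count i : Int)
    if p = 0 ∨ t = 0 then answer
    else if p ≥ t then answer + t
    else if p < t then answer + p
    else answer) 0

-- ===== PORT B =====
def solution_alt (people : List Int) (tshirts : List Int) : Int :=
  let cnt := tshirts.foldl (fun d t => d.insert t (d.getD t 0 + 1)) (PySem.Dict.empty : PySem.Dict Int Int)
  (people.foldl (fun st v =>
    if 1 ≤ v ∧ v ≤ 1000 ∧ st.1.getD v 0 > 0 then
      (st.1.insert v (st.1.getD v 0 - 1), st.2 + 1)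
    else st) (cnt, (0 : Int))).2

-- ===== PRECONDITION & SPEC =====
def Spec_solution (people : List Int) (tshirts : List Int) (out : Int) : Prop := out = solution_alt people tshirts
instance (people : List Int) (tshirts : List Int) (out : Int) : Decidable (Spec_solution people tshirts out) := by unfold Spec_solution; infer_instance

-- ===== CLAIM (what is proved, stated in full; the proofs are below) =====
def Claim_equal_solution : Prop := ∀ (people : List Int) (tshirts : List Int), Dom_solution people tshirts → Spec_solution people tshirts (solution people tshirts)

-- ===== LEMMAS AND PROOFS =====

-- sum over a nodup list of a function changed by +1 at one member
theorem pvSumUpdate (l : List Int) (f g : Int → Int) (v : Int)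
    (hnd : l.Nodup) (hv : v ∈ l)
    (hfg : ∀ i ∈ l, i ≠ v → f i = g i) (hfv : f v = g v + 1) :
    (l.map f).sum = (l.map g).sum + 1 := by
  induction l with
  | nil => cases hv
  | cons x tl ih =>
    rcases List.nodup_cons.mp hnd with ⟨hx, hndtl⟩
    rcases List.mem_cons.mp hv with rfl | hvtl
    · have : tl.map f = tl.map g := by
        apply List.map_congr_left
        intro i hi
        exact hfg i (List.mem_cons_of_mem _ hi) (fun h => hx (h ▸ hi))
      simp [this, hfv]; ring
    · have hxv : x ≠ v := fun h => hx (h ▸ hvtl)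
      have := ih hndtl hvtl (fun i hi hne => hfg i (List.mem_cons_of_mem _ hi) hne)
      simp [hfg x (List.mem_cons_self ..) hxv, this]; ring

-- A's loop adds min(count people i, count tshirts i) at every i
theorem pvA (people tshirts : List Int) (l : List Int) (a : Int) :
    l.foldl (fun answer i =>
      let p : Int := (people.count i : Int)
      let t : Int := (tshirts.count i : Int)
      if p = 0 ∨ t = 0 then answer
      else if p ≥ t then answer + t
      else if p < t then answer + p
      else answer) a
    = a + (l.map (fun i => min ((people.count i : Int)) ((tshirts.count i : Int)))).sum := by
  induction l generalizing a with
  | nil => simp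
  | cons x tl ih =>
    simp only [List.foldl_cons, List.map_cons, List.sum_cons, ih]
    have hp : (0:Int) ≤ (people.count x : Int) := Int.natCast_nonneg _
    have ht : (0:Int) ≤ (tshirts.count x : Int) := Int.natCast_nonneg _
    simp only [min_def]
    split_ifs <;> ring_nf <;> omega

-- B's greedy loop computes the same sum, for any nonnegative remaining-count dict
theorem pvB (xs : List Int) (d : PySem.Dict Int Int) (a : Int)
    (h : ∀ i, 0 ≤ d.getD i 0) :
    (xs.foldl (fun st v =>
      if 1 ≤ v ∧ v ≤ 1000 ∧ st.1.getD v 0 > 0 then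
        (st.1.insert v (st.1.getD v 0 - 1), st.2 + 1)
      else st) (d, a)).2
    = a + ((PySem.List.pyRange 1 1001 1).map
        (fun i => min ((xs.count i : Int)) (d.getD i 0))).sum := by
  induction xs generalizing d a with
  | nil =>
    simp only [List.foldl_nil]
    have : ((PySem.List.pyRange 1 1001 1).map
        (fun i => min (((List.nil (α := Int)).count i : Int)) (d.getD i 0))).sum = 0 := by
      apply List.sum_eq_zero
      intro x hx
      rcases List.mem_map.mp hx with ⟨i, _, rfl⟩
      simp [min_eq_left (h i)]
    omega
  | cons v tl ih =>
    simp only [List.foldl_cons]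
    by_cases hc : 1 ≤ v ∧ v ≤ 1000 ∧ d.getD v 0 > 0
    · rw [if_pos hc]
      have h' : ∀ i, 0 ≤ (d.insert v (d.getD v 0 - 1)).getD i 0 := by
        intro i
        rw [PySem.Dict.getD_insert]
        split_ifs with hi
        · omega
        · exact h i
      rw [ih _ _ h']
      have hsum : ((PySem.List.pyRange 1 1001 1).map
            (fun i => min (((v :: tl).count i : Int)) (d.getD i 0))).sum
          = ((PySem.List.pyRange 1 1001 1).map
            (fun i => min ((tl.count i : Int)) ((d.insert v (d.getD v 0 - 1)).getD i 0))).sum + 1 := by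
        apply pvSumUpdate _ _ _ v (PySem.List.nodup_pyRange_one 1 1001)
          ((PySem.List.mem_pyRange_one).mpr (by omega))
        · intro i _ hne
          rw [PySem.Dict.getD_insert, if_neg hne]
          have : (v :: tl).count i = tl.count i := by
            rw [List.count_cons]
            simp [Ne.symm hne]
          rw [this]
        · rw [PySem.Dict.getD_insert, if_pos rfl]
          have : (v :: tl).count v = tl.count v + 1 := by simp
          rw [this]
          push_cast
          omega
      rw [hsum]; ring
    · rw [if_neg hc]
      rw [ih _ _ h]
      have hmap : (PySem.List.pyRange 1 1001 1).map
            (fun i => min (((v :: tl).count i : Int)) (d.getD i 0))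
          = (PySem.List.pyRange 1 1001 1).map
            (fun i => min ((tl.count i : Int)) (d.getD i 0)) := by
        apply List.map_congr_left
        intro i hi
        have hi' := (PySem.List.mem_pyRange_one).mp hi
        by_cases hiv : i = v
        · subst hiv
          push Not at hc
          have hd0 : d.getD i 0 = 0 := by
            have h1 := h i
            have h2 := hc (by omega) (by omega)
            omega
          have hcnt : (i :: tl).count i = tl.count i + 1 := by simp
          rw [hcnt, hd0]
          push_cast
          omega
        · have hcnt : (v :: tl).count i = tl.count i := by
            rw [List.count_cons]; simp [Ne.symm hiv]
          rw [hcnt]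
      rw [hmap]

-- ===== VERDICT (by name: the statement is the Claim_ definition above) =====
theorem solution_spec : Claim_equal_solution := by
  intro people tshirts _
  simp only [Spec_solution, solution, solution_alt]
  have hd0 : ∀ i, (tshirts.foldl (fun d t => d.insert t (d.getD t 0 + 1))
      (PySem.Dict.empty : PySem.Dict Int Int)).getD i 0 = (tshirts.count i : Int) := by
    intro i
    rw [PySem.Dict.getD_foldl_insert_add_one]
    simp [PySem.Dict.getD_empty]
  rw [pvA]
  rw [pvB people (tshirts.foldl (fun d t => d.insert t (d.getD t 0 + 1)) (PySem.Dict.empty : PySem.Dict Int Int)) 0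
      (fun i => by rw [hd0 i]; exact Int.natCast_nonneg _)]
  simp only [hd0]
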